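-- pv_equiv track=rewrite | github.com/Dash1971/openclaw-ai-chess-coach | skills/chess-opponent-scout/scripts/analyze_player.py | eco_to_family
-- ===== SOURCE A (Python) =====
-- ECO_FAMILIES = {
--     'A00-A09': 'Irregular/Flank', 'A10-A39': 'English Opening',
--     'A40-A44': "Queen's Pawn (misc)", 'A45-A49': 'Indian/Trompowsky',
--     'A50-A79': 'Indian Systems', 'A80-A99': 'Dutch Defense',
--     'B00-B09': 'Misc 1.e4', 'B10-B19': 'Caro-Kann', 'B20-B99': 'Sicilian',
--     'C00-C19': 'French', 'C20-C29': "King's Pawn (open)",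
--     'C30-C39': "King's Gambit", 'C40-C49': 'Open Games (Philidor/Scotch/4Kts)',
--     'C50-C59': 'Italian/Giuoco Piano', 'C60-C99': 'Ruy Lopez',
--     'D00-D05': "Queen's Pawn (misc d)", 'D06-D09': 'QGD (misc)',
--     'D10-D19': 'Slav', 'D20-D29': 'QGA', 'D30-D69': 'QGD',
--     'D70-D99': 'Grünfeld', 'E00-E09': 'Catalan', 'E10-E19': "Queen's Indian",
--     'E20-E59': 'Nimzo-Indian', 'E60-E99': "King's Indian",
-- }
--
-- def eco_to_family(eco):
--     if not eco or eco in ('unknown', '?'): return 'Unknown'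
--     letter = eco[0]
--     try: num = int(eco[1:])
--     except: return 'Unknown'
--     for r, name in ECO_FAMILIES.items():
--         parts = r.split('-')
--         sl, sn = parts[0][0], int(parts[0][1:])
--         el, en = parts[1][0], int(parts[1][1:])
--         if letter == sl and sn <= num <= en: return name
--     return f'{letter}-other'
-- ===== SOURCE B (Python) =====
-- ECO_FAMILIES = {
--     'A00-A09': 'Irregular/Flank', 'A10-A39': 'English Opening',
--     'A40-A44': "Queen's Pawn (misc)", 'A45-A49': 'Indian/Trompowsky',
--     'A50-A79': 'Indian Systems', 'A80-A99': 'Dutch Defense',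
--     'B00-B09': 'Misc 1.e4', 'B10-B19': 'Caro-Kann', 'B20-B99': 'Sicilian',
--     'C00-C19': 'French', 'C20-C29': "King's Pawn (open)",
--     'C30-C39': "King's Gambit", 'C40-C49': 'Open Games (Philidor/Scotch/4Kts)',
--     'C50-C59': 'Italian/Giuoco Piano', 'C60-C99': 'Ruy Lopez',
--     'D00-D05': "Queen's Pawn (misc d)", 'D06-D09': 'QGD (misc)',
--     'D10-D19': 'Slav', 'D20-D29': 'QGA', 'D30-D69': 'QGD',
--     'D70-D99': 'Grünfeld', 'E00-E09': 'Catalan', 'E10-E19': "Queen's Indian",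
--     'E20-E59': 'Nimzo-Indian', 'E60-E99': "King's Indian",
-- }
--
-- # Flat lookup table built once at import time: each covered (letter, number)
-- # pair maps directly to its family name, so a call does one dict lookup
-- # instead of parsing and scanning all 25 range strings.
-- _TABLE = {}
-- for _r, _name in ECO_FAMILIES.items():
--     _lo, _hi = _r.split('-')
--     for _num in range(int(_lo[1:]), int(_hi[1:]) + 1):
--         _TABLE[(_lo[0], _num)] = _name
--
-- def eco_to_family(eco):
--     if not eco or eco in ('unknown', '?'): return 'Unknown'
--     letter = eco[0]
--     try: num = int(eco[1:])
--     except: return 'Unknown'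
--     return _TABLE.get((letter, num), f'{letter}-other')
-- ===== Notes on version B (the rewrite author's own statement) =====
-- stated objective: faster
-- what changed: A parses and scans all 25 ECO range strings on every call; B expands the ranges once at import time into a flat (letter, number) -> family dict, so each call is a single dictionary lookup with the same guards and the same f'{letter}-other' / 'Unknown' fallbacks.
import Mathlib
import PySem

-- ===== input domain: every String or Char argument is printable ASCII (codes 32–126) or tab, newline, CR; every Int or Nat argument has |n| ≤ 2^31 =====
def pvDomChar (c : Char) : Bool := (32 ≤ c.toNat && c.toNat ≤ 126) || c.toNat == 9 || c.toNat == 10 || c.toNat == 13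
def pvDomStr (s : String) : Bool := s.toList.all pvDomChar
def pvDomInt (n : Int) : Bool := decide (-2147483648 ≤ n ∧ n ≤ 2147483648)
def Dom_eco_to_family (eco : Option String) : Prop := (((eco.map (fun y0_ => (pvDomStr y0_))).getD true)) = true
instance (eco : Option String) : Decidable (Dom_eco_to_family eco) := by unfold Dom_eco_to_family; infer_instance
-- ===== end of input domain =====

-- B replaces A's per-call parse-and-scan of the 25 ECO range strings by a (letter, number) → family
-- table expanded once from the ranges, so a call is a single lookup; same guards and fallbacks.

-- ===== PORT A =====
-- module-level constant ECO_FAMILIES (shared data: B's source carries the same literal)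
def ecoFamilies : List (String × String) := [
  ("A00-A09", "Irregular/Flank"), ("A10-A39", "English Opening"),
  ("A40-A44", "Queen's Pawn (misc)"), ("A45-A49", "Indian/Trompowsky"),
  ("A50-A79", "Indian Systems"), ("A80-A99", "Dutch Defense"),
  ("B00-B09", "Misc 1.e4"), ("B10-B19", "Caro-Kann"), ("B20-B99", "Sicilian"),
  ("C00-C19", "French"), ("C20-C29", "King's Pawn (open)"),
  ("C30-C39", "King's Gambit"), ("C40-C49", "Open Games (Philidor/Scotch/4Kts)"),
  ("C50-C59", "Italian/Giuoco Piano"), ("C60-C99", "Ruy Lopez"),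
  ("D00-D05", "Queen's Pawn (misc d)"), ("D06-D09", "QGD (misc)"),
  ("D10-D19", "Slav"), ("D20-D29", "QGA"), ("D30-D69", "QGD"),
  ("D70-D99", "Grünfeld"), ("E00-E09", "Catalan"), ("E10-E19", "Queen's Indian"),
  ("E20-E59", "Nimzo-Indian"), ("E60-E99", "King's Indian")]

-- the 'for r, name in ECO_FAMILIES.items()' loop of A; the "Unknown" arms are unreachable on the
-- literal table above (there Python would raise before reaching them)
def scanA (letter : Char) (num : Int) : List (String × String) → String
  | [] => String.ofList (letter :: "-other".toList)        -- f'{letter}-other'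
  | (r, name) :: rest =>
    match PySem.Str.split? r "-" with                       -- parts = r.split('-')
    | some parts =>
      match PySem.List.pyGet? parts 0, PySem.List.pyGet? parts 1 with
      | some p0, some p1 =>
        match p0.toList, p1.toList with                     -- sl = parts[0][0], el = parts[1][0]
        | sl :: snChars, _el :: enChars =>                  -- sn = int(parts[0][1:]), en = int(parts[1][1:])
          match PySem.Int.ofStr? (String.ofList snChars), PySem.Int.ofStr? (String.ofList enChars) with
          | some sn, some en =>
            if letter = sl ∧ sn ≤ num ∧ num ≤ en then name else scanA letter num rest
          | _, _ => "Unknown"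
        | _, _ => "Unknown"
      | _, _ => "Unknown"
    | none => "Unknown"

def eco_to_family (eco : Option String) : String :=
  match eco with
  | none => "Unknown"                                       -- not eco
  | some s =>
    if s.toList = [] ∨ s = "unknown" ∨ s = "?" then "Unknown"   -- not eco or eco in ('unknown', '?')
    else
      match s.toList with
      | [] => "Unknown"                                     -- unreachable: s is nonempty here
      | letter :: rest =>                                   -- letter = eco[0]
        match PySem.Int.ofStr? (String.ofList rest) with    -- num = int(eco[1:])
        | none => "Unknown"                                 -- except: return 'Unknown'
        | some num => scanA letter num ecoFamilies

-- ===== PORT B =====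
-- the import-time loop of Source B: expand every range 'X aa - X bb' of ECO_FAMILIES into
-- (letter, number) ↦ family entries; the fall-through arms are unreachable on the literal table
def ecoTableStep (t : PySem.Dict (Char × Int) String) (rn : String × String) :
    PySem.Dict (Char × Int) String :=
  match PySem.Str.split? rn.1 "-" with                      -- lo, hi = r.split('-')
  | some [lo, hi] =>
    match lo.toList with
    | c :: loDigits =>
      match PySem.Int.ofStr? (String.ofList loDigits),      -- range(int(lo[1:]), int(hi[1:]) + 1)
            PySem.Int.ofStr? (String.ofList (hi.toList.drop 1)) with
      | some a, some b =>
        (PySem.List.pyRange a (b + 1) 1).foldl (fun t num => t.insert (c, num) rn.2) t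
      | _, _ => t
    | [] => t
  | _ => t

def ecoTable : PySem.Dict (Char × Int) String :=
  ecoFamilies.foldl ecoTableStep PySem.Dict.empty

def eco_to_family_alt (eco : Option String) : String :=
  match eco with
  | none => "Unknown"
  | some s =>
    if s.toList = [] ∨ s = "unknown" ∨ s = "?" then "Unknown"
    else
      match s.toList with
      | [] => "Unknown"                                     -- unreachable: s is nonempty here
      | letter :: rest =>
        match PySem.Int.ofStr? (String.ofList rest) with
        | none => "Unknown"
        | some num =>                                       -- _TABLE.get((letter, num), f'{letter}-other')
          ecoTable.getD (letter, num) (String.ofList (letter :: "-other".toList))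

-- ===== PRECONDITION & SPEC =====
def Spec_eco_to_family (eco : Option String) (out : String) : Prop := out = eco_to_family_alt eco
instance (eco : Option String) (out : String) : Decidable (Spec_eco_to_family eco out) := by unfold Spec_eco_to_family; infer_instance

-- ===== CLAIM (what is proved, stated in full; the proofs are below) =====
def Claim_equal_eco_to_family : Prop := ∀ (eco : Option String), Dom_eco_to_family eco → Spec_eco_to_family eco (eco_to_family eco)

-- ===== LEMMAS AND PROOFS =====

-- proof-side abbreviation for one expanded range of B's table-building fold
def insRange (t : PySem.Dict (Char × Int) String) (c : Char) (a b : Int) (name : String) :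
    PySem.Dict (Char × Int) String :=
  (PySem.List.pyRange a b 1).foldl (fun t num => t.insert (c, num) name) t

-- a lookup after inserting one whole range: hit inside the range, untouched outside it
lemma getD_insRange (c : Char) (b : Int) (name d : String) (x : Char) (n : Int) :
    ∀ (a : Int) (t : PySem.Dict (Char × Int) String),
      (insRange t c a b name).getD (x, n) d
        = if x = c ∧ a ≤ n ∧ n < b then name else t.getD (x, n) d := by
  have main : ∀ (cnt : Nat) (a : Int) (t : PySem.Dict (Char × Int) String), (b - a).toNat = cnt →
      (insRange t c a b name).getD (x, n) d
        = if x = c ∧ a ≤ n ∧ n < b then name else t.getD (x, n) d := by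
    intro cnt
    induction cnt with
    | zero =>
      intro a t hn
      rw [insRange, PySem.List.pyRange_one_eq_nil (by omega)]
      simp only [List.foldl_nil]
      rw [if_neg (by omega)]
    | succ cnt ih =>
      intro a t hn
      rw [insRange, PySem.List.pyRange_one_cons (by omega)]
      simp only [List.foldl_cons]
      have hrec := ih (a + 1) (t.insert (c, a) name) (by omega)
      rw [insRange] at hrec
      rw [hrec, PySem.Dict.getD_insert]
      by_cases hc : x = c
      · subst hc
        simp only [Prod.mk.injEq, true_and]
        split_ifs <;> first | rfl | omega
      · simp [Prod.mk.injEq, hc]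
  intro a t
  exact main (b - a).toNat a t rfl

-- one fold step of B's table construction, for an entry whose range string parses
lemma stepParse (t : PySem.Dict (Char × Int) String) (nm r lo hi : String)
    (c : Char) (lod : List Char) (a b : Int)
    (h1 : PySem.Str.split? r "-" = some [lo, hi])
    (h2 : lo.toList = c :: lod)
    (h3 : PySem.Int.ofStr? (String.ofList lod) = some a)
    (h4 : PySem.Int.ofStr? (String.ofList (hi.toList.drop 1)) = some b) :
    ecoTableStep t (r, nm) = insRange t c a (b + 1) nm := by
  simp only [ecoTableStep, h1, h2, h3, h4, insRange]

-- the 25 fold steps on their literal range strings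
lemma stepEq0 (t : PySem.Dict (Char × Int) String) (nm : String) :
    ecoTableStep t ("A00-A09", nm) = insRange t 'A' 0 10 nm := by
  rw [stepParse t nm _ "A00" "A09" 'A' ['0','0'] 0 9 (by decide) (by decide) (by decide) (by decide)]; norm_num
lemma stepEq1 (t : PySem.Dict (Char × Int) String) (nm : String) :
    ecoTableStep t ("A10-A39", nm) = insRange t 'A' 10 40 nm := by
  rw [stepParse t nm _ "A10" "A39" 'A' ['1','0'] 10 39 (by decide) (by decide) (by decide) (by decide)]; norm_num
lemma stepEq2 (t : PySem.Dict (Char × Int) String) (nm : String) :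
    ecoTableStep t ("A40-A44", nm) = insRange t 'A' 40 45 nm := by
  rw [stepParse t nm _ "A40" "A44" 'A' ['4','0'] 40 44 (by decide) (by decide) (by decide) (by decide)]; norm_num
lemma stepEq3 (t : PySem.Dict (Char × Int) String) (nm : String) :
    ecoTableStep t ("A45-A49", nm) = insRange t 'A' 45 50 nm := by
  rw [stepParse t nm _ "A45" "A49" 'A' ['4','5'] 45 49 (by decide) (by decide) (by decide) (by decide)]; norm_num
lemma stepEq4 (t : PySem.Dict (Char × Int) String) (nm : String) :
    ecoTableStep t ("A50-A79", nm) = insRange t 'A' 50 80 nm := by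
  rw [stepParse t nm _ "A50" "A79" 'A' ['5','0'] 50 79 (by decide) (by decide) (by decide) (by decide)]; norm_num
lemma stepEq5 (t : PySem.Dict (Char × Int) String) (nm : String) :
    ecoTableStep t ("A80-A99", nm) = insRange t 'A' 80 100 nm := by
  rw [stepParse t nm _ "A80" "A99" 'A' ['8','0'] 80 99 (by decide) (by decide) (by decide) (by decide)]; norm_num
lemma stepEq6 (t : PySem.Dict (Char × Int) String) (nm : String) :
    ecoTableStep t ("B00-B09", nm) = insRange t 'B' 0 10 nm := by
  rw [stepParse t nm _ "B00" "B09" 'B' ['0','0'] 0 9 (by decide) (by decide) (by decide) (by decide)]; norm_num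
lemma stepEq7 (t : PySem.Dict (Char × Int) String) (nm : String) :
    ecoTableStep t ("B10-B19", nm) = insRange t 'B' 10 20 nm := by
  rw [stepParse t nm _ "B10" "B19" 'B' ['1','0'] 10 19 (by decide) (by decide) (by decide) (by decide)]; norm_num
lemma stepEq8 (t : PySem.Dict (Char × Int) String) (nm : String) :
    ecoTableStep t ("B20-B99", nm) = insRange t 'B' 20 100 nm := by
  rw [stepParse t nm _ "B20" "B99" 'B' ['2','0'] 20 99 (by decide) (by decide) (by decide) (by decide)]; norm_num
lemma stepEq9 (t : PySem.Dict (Char × Int) String) (nm : String) :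
    ecoTableStep t ("C00-C19", nm) = insRange t 'C' 0 20 nm := by
  rw [stepParse t nm _ "C00" "C19" 'C' ['0','0'] 0 19 (by decide) (by decide) (by decide) (by decide)]; norm_num
lemma stepEq10 (t : PySem.Dict (Char × Int) String) (nm : String) :
    ecoTableStep t ("C20-C29", nm) = insRange t 'C' 20 30 nm := by
  rw [stepParse t nm _ "C20" "C29" 'C' ['2','0'] 20 29 (by decide) (by decide) (by decide) (by decide)]; norm_num
lemma stepEq11 (t : PySem.Dict (Char × Int) String) (nm : String) :
    ecoTableStep t ("C30-C39", nm) = insRange t 'C' 30 40 nm := by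
  rw [stepParse t nm _ "C30" "C39" 'C' ['3','0'] 30 39 (by decide) (by decide) (by decide) (by decide)]; norm_num
lemma stepEq12 (t : PySem.Dict (Char × Int) String) (nm : String) :
    ecoTableStep t ("C40-C49", nm) = insRange t 'C' 40 50 nm := by
  rw [stepParse t nm _ "C40" "C49" 'C' ['4','0'] 40 49 (by decide) (by decide) (by decide) (by decide)]; norm_num
lemma stepEq13 (t : PySem.Dict (Char × Int) String) (nm : String) :
    ecoTableStep t ("C50-C59", nm) = insRange t 'C' 50 60 nm := by
  rw [stepParse t nm _ "C50" "C59" 'C' ['5','0'] 50 59 (by decide) (by decide) (by decide) (by decide)]; norm_num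
lemma stepEq14 (t : PySem.Dict (Char × Int) String) (nm : String) :
    ecoTableStep t ("C60-C99", nm) = insRange t 'C' 60 100 nm := by
  rw [stepParse t nm _ "C60" "C99" 'C' ['6','0'] 60 99 (by decide) (by decide) (by decide) (by decide)]; norm_num
lemma stepEq15 (t : PySem.Dict (Char × Int) String) (nm : String) :
    ecoTableStep t ("D00-D05", nm) = insRange t 'D' 0 6 nm := by
  rw [stepParse t nm _ "D00" "D05" 'D' ['0','0'] 0 5 (by decide) (by decide) (by decide) (by decide)]; norm_num
lemma stepEq16 (t : PySem.Dict (Char × Int) String) (nm : String) :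
    ecoTableStep t ("D06-D09", nm) = insRange t 'D' 6 10 nm := by
  rw [stepParse t nm _ "D06" "D09" 'D' ['0','6'] 6 9 (by decide) (by decide) (by decide) (by decide)]; norm_num
lemma stepEq17 (t : PySem.Dict (Char × Int) String) (nm : String) :
    ecoTableStep t ("D10-D19", nm) = insRange t 'D' 10 20 nm := by
  rw [stepParse t nm _ "D10" "D19" 'D' ['1','0'] 10 19 (by decide) (by decide) (by decide) (by decide)]; norm_num
lemma stepEq18 (t : PySem.Dict (Char × Int) String) (nm : String) :
    ecoTableStep t ("D20-D29", nm) = insRange t 'D' 20 30 nm := by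
  rw [stepParse t nm _ "D20" "D29" 'D' ['2','0'] 20 29 (by decide) (by decide) (by decide) (by decide)]; norm_num
lemma stepEq19 (t : PySem.Dict (Char × Int) String) (nm : String) :
    ecoTableStep t ("D30-D69", nm) = insRange t 'D' 30 70 nm := by
  rw [stepParse t nm _ "D30" "D69" 'D' ['3','0'] 30 69 (by decide) (by decide) (by decide) (by decide)]; norm_num
lemma stepEq20 (t : PySem.Dict (Char × Int) String) (nm : String) :
    ecoTableStep t ("D70-D99", nm) = insRange t 'D' 70 100 nm := by
  rw [stepParse t nm _ "D70" "D99" 'D' ['7','0'] 70 99 (by decide) (by decide) (by decide) (by decide)]; norm_num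
lemma stepEq21 (t : PySem.Dict (Char × Int) String) (nm : String) :
    ecoTableStep t ("E00-E09", nm) = insRange t 'E' 0 10 nm := by
  rw [stepParse t nm _ "E00" "E09" 'E' ['0','0'] 0 9 (by decide) (by decide) (by decide) (by decide)]; norm_num
lemma stepEq22 (t : PySem.Dict (Char × Int) String) (nm : String) :
    ecoTableStep t ("E10-E19", nm) = insRange t 'E' 10 20 nm := by
  rw [stepParse t nm _ "E10" "E19" 'E' ['1','0'] 10 19 (by decide) (by decide) (by decide) (by decide)]; norm_num
lemma stepEq23 (t : PySem.Dict (Char × Int) String) (nm : String) :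
    ecoTableStep t ("E20-E59", nm) = insRange t 'E' 20 60 nm := by
  rw [stepParse t nm _ "E20" "E59" 'E' ['2','0'] 20 59 (by decide) (by decide) (by decide) (by decide)]; norm_num
lemma stepEq24 (t : PySem.Dict (Char × Int) String) (nm : String) :
    ecoTableStep t ("E60-E99", nm) = insRange t 'E' 60 100 nm := by
  rw [stepParse t nm _ "E60" "E99" 'E' ['6','0'] 60 99 (by decide) (by decide) (by decide) (by decide)]; norm_num

-- A's scan over the literal table, as a chain of range tests (definitional)
set_option maxRecDepth 10000 in
set_option maxHeartbeats 1000000 in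
lemma scanA_eq (letter : Char) (num : Int) :
    scanA letter num ecoFamilies =
      if letter = 'A' ∧ 0 ≤ num ∧ num ≤ 9 then "Irregular/Flank"
      else if letter = 'A' ∧ 10 ≤ num ∧ num ≤ 39 then "English Opening"
      else if letter = 'A' ∧ 40 ≤ num ∧ num ≤ 44 then "Queen's Pawn (misc)"
      else if letter = 'A' ∧ 45 ≤ num ∧ num ≤ 49 then "Indian/Trompowsky"
      else if letter = 'A' ∧ 50 ≤ num ∧ num ≤ 79 then "Indian Systems"
      else if letter = 'A' ∧ 80 ≤ num ∧ num ≤ 99 then "Dutch Defense"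
      else if letter = 'B' ∧ 0 ≤ num ∧ num ≤ 9 then "Misc 1.e4"
      else if letter = 'B' ∧ 10 ≤ num ∧ num ≤ 19 then "Caro-Kann"
      else if letter = 'B' ∧ 20 ≤ num ∧ num ≤ 99 then "Sicilian"
      else if letter = 'C' ∧ 0 ≤ num ∧ num ≤ 19 then "French"
      else if letter = 'C' ∧ 20 ≤ num ∧ num ≤ 29 then "King's Pawn (open)"
      else if letter = 'C' ∧ 30 ≤ num ∧ num ≤ 39 then "King's Gambit"
      else if letter = 'C' ∧ 40 ≤ num ∧ num ≤ 49 then "Open Games (Philidor/Scotch/4Kts)"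
      else if letter = 'C' ∧ 50 ≤ num ∧ num ≤ 59 then "Italian/Giuoco Piano"
      else if letter = 'C' ∧ 60 ≤ num ∧ num ≤ 99 then "Ruy Lopez"
      else if letter = 'D' ∧ 0 ≤ num ∧ num ≤ 5 then "Queen's Pawn (misc d)"
      else if letter = 'D' ∧ 6 ≤ num ∧ num ≤ 9 then "QGD (misc)"
      else if letter = 'D' ∧ 10 ≤ num ∧ num ≤ 19 then "Slav"
      else if letter = 'D' ∧ 20 ≤ num ∧ num ≤ 29 then "QGA"
      else if letter = 'D' ∧ 30 ≤ num ∧ num ≤ 69 then "QGD"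
      else if letter = 'D' ∧ 70 ≤ num ∧ num ≤ 99 then "Grünfeld"
      else if letter = 'E' ∧ 0 ≤ num ∧ num ≤ 9 then "Catalan"
      else if letter = 'E' ∧ 10 ≤ num ∧ num ≤ 19 then "Queen's Indian"
      else if letter = 'E' ∧ 20 ≤ num ∧ num ≤ 59 then "Nimzo-Indian"
      else if letter = 'E' ∧ 60 ≤ num ∧ num ≤ 99 then "King's Indian"
      else String.ofList (letter :: "-other".toList) := by rfl

-- B's lookup in the expanded table, as the reverse chain of the same (disjoint) range tests
set_option maxRecDepth 10000 in
set_option maxHeartbeats 1000000 in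
lemma tbl_getD (letter : Char) (num : Int) (d : String) :
    ecoTable.getD (letter, num) d =
      if letter = 'E' ∧ 60 ≤ num ∧ num < 100 then "King's Indian"
      else if letter = 'E' ∧ 20 ≤ num ∧ num < 60 then "Nimzo-Indian"
      else if letter = 'E' ∧ 10 ≤ num ∧ num < 20 then "Queen's Indian"
      else if letter = 'E' ∧ 0 ≤ num ∧ num < 10 then "Catalan"
      else if letter = 'D' ∧ 70 ≤ num ∧ num < 100 then "Grünfeld"
      else if letter = 'D' ∧ 30 ≤ num ∧ num < 70 then "QGD"
      else if letter = 'D' ∧ 20 ≤ num ∧ num < 30 then "QGA"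
      else if letter = 'D' ∧ 10 ≤ num ∧ num < 20 then "Slav"
      else if letter = 'D' ∧ 6 ≤ num ∧ num < 10 then "QGD (misc)"
      else if letter = 'D' ∧ 0 ≤ num ∧ num < 6 then "Queen's Pawn (misc d)"
      else if letter = 'C' ∧ 60 ≤ num ∧ num < 100 then "Ruy Lopez"
      else if letter = 'C' ∧ 50 ≤ num ∧ num < 60 then "Italian/Giuoco Piano"
      else if letter = 'C' ∧ 40 ≤ num ∧ num < 50 then "Open Games (Philidor/Scotch/4Kts)"
      else if letter = 'C' ∧ 30 ≤ num ∧ num < 40 then "King's Gambit"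
      else if letter = 'C' ∧ 20 ≤ num ∧ num < 30 then "King's Pawn (open)"
      else if letter = 'C' ∧ 0 ≤ num ∧ num < 20 then "French"
      else if letter = 'B' ∧ 20 ≤ num ∧ num < 100 then "Sicilian"
      else if letter = 'B' ∧ 10 ≤ num ∧ num < 20 then "Caro-Kann"
      else if letter = 'B' ∧ 0 ≤ num ∧ num < 10 then "Misc 1.e4"
      else if letter = 'A' ∧ 80 ≤ num ∧ num < 100 then "Dutch Defense"
      else if letter = 'A' ∧ 50 ≤ num ∧ num < 80 then "Indian Systems"
      else if letter = 'A' ∧ 45 ≤ num ∧ num < 50 then "Indian/Trompowsky"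
      else if letter = 'A' ∧ 40 ≤ num ∧ num < 45 then "Queen's Pawn (misc)"
      else if letter = 'A' ∧ 10 ≤ num ∧ num < 40 then "English Opening"
      else if letter = 'A' ∧ 0 ≤ num ∧ num < 10 then "Irregular/Flank"
      else d := by
  unfold ecoTable ecoFamilies
  simp only [List.foldl_cons, List.foldl_nil]
  simp only [stepEq0, stepEq1, stepEq2, stepEq3, stepEq4, stepEq5, stepEq6, stepEq7, stepEq8, stepEq9, stepEq10, stepEq11, stepEq12, stepEq13, stepEq14, stepEq15, stepEq16, stepEq17, stepEq18, stepEq19, stepEq20, stepEq21, stepEq22, stepEq23, stepEq24]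
  simp only [getD_insRange, PySem.Dict.getD_empty]

-- the scan and the table lookup agree for every letter and number
set_option maxRecDepth 10000 in
set_option maxHeartbeats 2000000 in
lemma core (letter : Char) (num : Int) :
    scanA letter num ecoFamilies
      = ecoTable.getD (letter, num) (String.ofList (letter :: "-other".toList)) := by
  rw [scanA_eq, tbl_getD]
  by_cases hA : letter = 'A'
  · subst hA; simp; split_ifs <;> first | rfl | omega
  by_cases hB : letter = 'B'
  · subst hB; simp; split_ifs <;> first | rfl | omega
  by_cases hC : letter = 'C'
  · subst hC; simp; split_ifs <;> first | rfl | omega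
  by_cases hD : letter = 'D'
  · subst hD; simp; split_ifs <;> first | rfl | omega
  by_cases hE : letter = 'E'
  · subst hE; simp; split_ifs <;> first | rfl | omega
  simp [hA, hB, hC, hD, hE]

-- ===== VERDICT (by name: the statement is the Claim_ definition above) =====
theorem eco_to_family_spec : Claim_equal_eco_to_family := by
  intro eco _
  unfold Spec_eco_to_family eco_to_family eco_to_family_alt
  cases eco with
  | none => rfl
  | some s =>
    rcases hs : s.toList with _ | ⟨letter, rest⟩
    · simp [hs]
    · simp only [hs]
      by_cases hu : s = "unknown" ∨ s = "?"
      · rw [if_pos (by simp [hu]), if_pos (by simp [hu])]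
      · rw [if_neg (by simp [hu]), if_neg (by simp [hu])]
        rcases ho : PySem.Int.ofStr? (String.ofList rest) with _ | num
        · rfl
        · exact core letter num
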